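-- pv_equiv track=rewrite | github.com/DD-65/sat-sudoku | sat/builder.py | summarize_problem
-- ===== SOURCE A (Python) =====
-- from typing import Dict, Iterable, List, Optional, Sequence, Tuple, Set
--
-- def summarize_problem(
--     N: int, blocked: Iterable[Tuple[int, int]], givens: Sequence[Tuple[int, int, int]]
-- ) -> str:
--     """
--     Human-readable summary (rows/cols are 1-based).
--     """
--     b = set(blocked)
--     g = {(r, c): d for (r, c, d) in givens}
--     lines: List[str] = []
--     for r in range(1, N + 1):
--         row = []
--         for c in range(1, N + 1):
--             if (r, c) in b:
--                 row.append("■")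
--             elif (r, c) in g:
--                 row.append(str(g[(r, c)]))
--             else:
--                 row.append(".")
--         lines.append(" ".join(row))
--     return "\n".join(lines)
-- ===== SOURCE B (Python) =====
-- def summarize_problem(N, blocked, givens):
--     """
--     Human-readable summary (rows/cols are 1-based).
--     Scatter approach: fill a default grid, then write givens, then blocked
--     (blocked overrides givens); out-of-range coordinates are skipped.
--     """
--     grid = [["."] * N for _ in range(N)]
--     for (r, c, d) in givens:
--         if 1 <= r <= N and 1 <= c <= N:
--             grid[r - 1][c - 1] = str(d)
--     for (r, c) in blocked:
--         if 1 <= r <= N and 1 <= c <= N: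
--             grid[r - 1][c - 1] = "■"
--     return "\n".join(" ".join(row) for row in grid)
-- ===== Notes on version B (the rewrite author's own statement) =====
-- stated objective: alternative
-- what changed: B scatters the givens and then the blocked cells into a pre-built default N x N grid (write with a bounds guard, blocked written last so it overrides), instead of A's gather loop that tests every cell of the grid against a set of blocked cells and a dict of givens.
import Mathlib
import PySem

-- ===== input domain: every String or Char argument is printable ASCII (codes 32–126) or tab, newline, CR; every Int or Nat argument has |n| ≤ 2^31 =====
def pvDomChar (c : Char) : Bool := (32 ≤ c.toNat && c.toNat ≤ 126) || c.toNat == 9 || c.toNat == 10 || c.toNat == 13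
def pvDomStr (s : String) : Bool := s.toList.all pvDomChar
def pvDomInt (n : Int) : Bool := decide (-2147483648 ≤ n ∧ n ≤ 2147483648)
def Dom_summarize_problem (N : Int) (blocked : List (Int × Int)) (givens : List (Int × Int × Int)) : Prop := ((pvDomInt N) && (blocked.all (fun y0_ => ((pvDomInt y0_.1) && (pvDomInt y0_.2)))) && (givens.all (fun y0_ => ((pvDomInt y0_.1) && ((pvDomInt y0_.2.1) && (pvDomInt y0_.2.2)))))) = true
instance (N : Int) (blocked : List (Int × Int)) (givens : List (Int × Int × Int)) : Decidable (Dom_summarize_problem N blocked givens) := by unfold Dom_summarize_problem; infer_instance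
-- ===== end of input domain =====

-- B scatters givens/blocked into a pre-filled grid instead of testing every cell against a set/dict (objective: simpler decomposition).

-- ===== PORT A =====
def summarize_problem (N : Int) (blocked : List (Int × Int)) (givens : List (Int × Int × Int)) : String :=
  let b : PySem.Set (Int × Int) := PySem.Set.ofList blocked
  let g : PySem.Dict (Int × Int) Int :=
    givens.foldl (fun d t => d.insert (t.1, t.2.1) t.2.2) PySem.Dict.empty
  let lines : List String :=
    (PySem.List.pyRange 1 (N + 1) 1).foldl (fun lines r =>
      let row : List String :=
        (PySem.List.pyRange 1 (N + 1) 1).foldl (fun row c =>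
          if PySem.Set.contains b (r, c) then row ++ ["■"]
          else match g.get? (r, c) with
            | some d => row ++ [PySem.Int.toStr d]
            | none => row ++ ["."]) []
      lines ++ [PySem.Str.join " " row]) []
  PySem.Str.join "\n" lines

-- ===== PORT B =====
-- grid[r-1][c-1] = x under the bounds guard; exact: the guard makes both indices in range
def pvSetCell (N : Int) (g : List (List String)) (r c : Int) (x : String) : List (List String) :=
  if 1 ≤ r ∧ r ≤ N ∧ 1 ≤ c ∧ c ≤ N then
    g.set (r - 1).toNat ((g.getD (r - 1).toNat []).set (c - 1).toNat x)
  else g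

def summarize_problem_alt (N : Int) (blocked : List (Int × Int)) (givens : List (Int × Int × Int)) : String :=
  let grid0 : List (List String) := (List.range N.toNat).map (fun _ => List.replicate N.toNat ".")
  let grid1 := givens.foldl (fun g t => pvSetCell N g t.1 t.2.1 (PySem.Int.toStr t.2.2)) grid0
  let grid2 := blocked.foldl (fun g t => pvSetCell N g t.1 t.2 "■") grid1
  PySem.Str.join "\n" (grid2.map (fun row => PySem.Str.join " " row))

-- ===== PRECONDITION & SPEC =====
def Spec_summarize_problem (N : Int) (blocked : List (Int × Int)) (givens : List (Int × Int × Int)) (out : String) : Prop := out = summarize_problem_alt N blocked givens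
instance (N : Int) (blocked : List (Int × Int)) (givens : List (Int × Int × Int)) (out : String) : Decidable (Spec_summarize_problem N blocked givens out) := by unfold Spec_summarize_problem; infer_instance

-- ===== CLAIM (what is proved, stated in full; the proofs are below) =====
def Claim_equal_summarize_problem : Prop := ∀ (N : Int) (blocked : List (Int × Int)) (givens : List (Int × Int × Int)), Dom_summarize_problem N blocked givens → Spec_summarize_problem N blocked givens (summarize_problem N blocked givens)

-- ===== LEMMAS AND PROOFS =====

-- the value of cell (r, c) in A's formulation
def pvCellA (b : PySem.Set (Int × Int)) (g : PySem.Dict (Int × Int) Int) (r c : Int) : String :=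
  if PySem.Set.contains b (r, c) then "■"
  else match g.get? (r, c) with
    | some d => PySem.Int.toStr d
    | none => "."

-- a rectangular n × n grid
def pvRect (n : Nat) (g : List (List String)) : Prop :=
  g.length = n ∧ ∀ row ∈ g, row.length = n

theorem pvGetD_mem {α : Type} (l : List α) (d : α) {i : Nat} (h : i < l.length) :
    l.getD i d ∈ l := by
  rw [List.getD_eq_getElem?_getD, List.getElem?_eq_getElem h, Option.getD_some]
  exact List.getElem_mem h

theorem pvGetD_set {α : Type} (l : List α) (m i : Nat) (a d : α) :
    (l.set m a).getD i d = if i = m ∧ m < l.length then a else l.getD i d := by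
  by_cases h : i = m ∧ m < l.length
  · rw [if_pos h, List.getD_eq_getElem?_getD, h.1, List.getElem?_set_self (by omega), Option.getD_some]
  · rw [if_neg h]
    by_cases hm : i = m
    · subst hm
      have : l.length ≤ i := by omega
      rw [List.set_eq_of_length_le this]
    · rw [List.getD_eq_getElem?_getD, List.getElem?_set_ne (Ne.symm hm), ← List.getD_eq_getElem?_getD]

theorem pvRect_setCell {N : Int} {n : Nat} {g : List (List String)} (h : pvRect n g)
    (hn : n = N.toNat) (r c : Int) (x : String) : pvRect n (pvSetCell N g r c x) := by
  obtain ⟨h1, h2⟩ := h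
  unfold pvSetCell
  split
  · rename_i hb
    have hri : (r - 1).toNat < g.length := by omega
    refine ⟨by simpa using h1, ?_⟩
    intro row hrow
    rcases List.mem_or_eq_of_mem_set hrow with hmem | hmem
    · exact h2 _ hmem
    · subst hmem
      rw [List.length_set]
      exact h2 _ (pvGetD_mem _ _ hri)
  · exact ⟨h1, h2⟩

theorem pvRect_foldl {α : Type} {n : Nat} (N : Int) (hn : n = N.toNat)
    (key : α → Int × Int) (val : α → String)
    (l : List α) (g : List (List String)) (h : pvRect n g) :
    pvRect n (l.foldl (fun g t => pvSetCell N g (key t).1 (key t).2 (val t)) g) := by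
  induction l generalizing g with
  | nil => exact h
  | cons t l ih => exact ih _ (pvRect_setCell h hn _ _ _)

-- one write, observed at cell (i, j)
theorem pvCell_setCell {N : Int} {n : Nat} {g : List (List String)} (hg : pvRect n g)
    (hn : n = N.toNat) (r c : Int) (x : String) {i j : Nat} (hi : i < n) (hj : j < n) :
    ((pvSetCell N g r c x).getD i []).getD j "" =
      if r = (i : Int) + 1 ∧ c = (j : Int) + 1 then x else (g.getD i []).getD j "" := by
  obtain ⟨h1, h2⟩ := hg
  unfold pvSetCell
  split
  · rename_i hb
    have hri : (r - 1).toNat < g.length := by omega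
    rw [pvGetD_set]
    by_cases hr : i = (r - 1).toNat
    · rw [if_pos ⟨hr, hri⟩]
      have hrowlen : (g.getD (r - 1).toNat []).length = n := h2 _ (pvGetD_mem _ _ hri)
      rw [pvGetD_set]
      by_cases hc : j = (c - 1).toNat
      · rw [if_pos ⟨hc, by omega⟩, if_pos ⟨by omega, by omega⟩]
      · rw [if_neg (by rintro ⟨hA, hB⟩; exact hc (by omega)),
          if_neg (by rintro ⟨hA, hB⟩; exact hc (by omega)), hr]
    · rw [if_neg (fun hh => hr hh.1),
        if_neg (by rintro ⟨hA, hB⟩; exact hr (by omega))]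
  · rename_i hb
    rw [if_neg (by rintro ⟨hA, hB⟩; exact hb ⟨by omega, by omega, by omega, by omega⟩)]

-- a whole scatter loop, observed at cell (i, j)
theorem pvCell_foldl {α : Type} {N : Int} {n : Nat} (key : α → Int × Int) (val : α → String)
    (l : List α) (g : List (List String)) (hg : pvRect n g) (hn : n = N.toNat)
    {i j : Nat} (hi : i < n) (hj : j < n) :
    (((l.foldl (fun g t => pvSetCell N g (key t).1 (key t).2 (val t)) g)).getD i []).getD j "" =
      l.foldl (fun acc t =>
        if (key t).1 = (i : Int) + 1 ∧ (key t).2 = (j : Int) + 1 then val t else acc)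
        ((g.getD i []).getD j "") := by
  induction l generalizing g with
  | nil => rfl
  | cons t l ih =>
    simp only [List.foldl_cons]
    rw [ih _ (pvRect_setCell hg hn _ _ _), pvCell_setCell hg hn _ _ _ hi hj]

-- the "blocked" pass: a constant write is a membership test
theorem pvFoldl_blocked (l : List (Int × Int)) (r c : Int) (s : String) :
    (l.foldl (fun acc t => if t.1 = r ∧ t.2 = c then "■" else acc) s) =
      if (r, c) ∈ l then "■" else s := by
  induction l generalizing s with
  | nil => simp
  | cons t l ih =>
    simp only [List.foldl_cons]
    rw [ih]
    by_cases h : t.1 = r ∧ t.2 = c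
    · obtain ⟨t1, t2⟩ := t
      obtain ⟨hA, hB⟩ := h
      simp only at hA hB
      subst hA; subst hB
      simp [List.mem_cons]
    · have hne : (r, c) ≠ t := by rintro rfl; exact h ⟨rfl, rfl⟩
      rw [if_neg h]
      simp [List.mem_cons, hne]

-- the "givens" pass equals the dict lookup: first the dict as an option-fold …
theorem pvDict_get?_foldl (l : List (Int × Int × Int)) (d : PySem.Dict (Int × Int) Int)
    (k : Int × Int) :
    (l.foldl (fun d t => d.insert (t.1, t.2.1) t.2.2) d).get? k =
      l.foldl (fun o t => if (t.1, t.2.1) = k then some t.2.2 else o) (d.get? k) := by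
  induction l generalizing d with
  | nil => rfl
  | cons t l ih =>
    simp only [List.foldl_cons]
    rw [ih]
    congr 1
    rw [PySem.Dict.get?_insert]
    by_cases h : (t.1, t.2.1) = k
    · rw [if_pos h.symm, if_pos h]
    · rw [if_neg (fun hh => h hh.symm), if_neg h]

-- … then a string fold over an option-match commutes with the option fold
theorem pvFold_match (k : Int × Int) (l : List (Int × Int × Int)) (o : Option Int) :
    (l.foldl (fun acc t =>
        if (t.1, t.2.1).1 = k.1 ∧ (t.1, t.2.1).2 = k.2 then PySem.Int.toStr t.2.2 else acc)
        (match o with | some d => PySem.Int.toStr d | none => ".")) =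
      (match l.foldl (fun o t => if (t.1, t.2.1) = k then some t.2.2 else o) o with
        | some d => PySem.Int.toStr d | none => ".") := by
  induction l generalizing o with
  | nil => rfl
  | cons t l ih =>
    simp only [List.foldl_cons]
    by_cases h : (t.1, t.2.1) = k
    · rw [if_pos ⟨congrArg Prod.fst h, congrArg Prod.snd h⟩, if_pos h]
      exact ih (some t.2.2)
    · rw [if_neg (by rintro ⟨h1, h2⟩; exact h (Prod.ext h1 h2)), if_neg h]
      exact ih o

-- cell (i, j) of B's finished grid is A's cell value
theorem pvGridCell (N : Int) (blocked : List (Int × Int)) (givens : List (Int × Int × Int))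
    {i j : Nat} (hi : i < N.toNat) (hj : j < N.toNat) :
    let grid0 : List (List String) := (List.range N.toNat).map (fun _ => List.replicate N.toNat ".")
    let grid1 := givens.foldl (fun g t => pvSetCell N g t.1 t.2.1 (PySem.Int.toStr t.2.2)) grid0
    let grid2 := blocked.foldl (fun g t => pvSetCell N g t.1 t.2 "■") grid1
    ((grid2.getD i []).getD j "") =
      pvCellA (PySem.Set.ofList blocked)
        (givens.foldl (fun d t => d.insert (t.1, t.2.1) t.2.2) PySem.Dict.empty)
        ((i : Int) + 1) ((j : Int) + 1) := by
  intro grid0 grid1 grid2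
  have hrect0 : pvRect N.toNat grid0 := by
    constructor
    · simp [grid0]
    · intro row hrow
      simp only [grid0, List.mem_map] at hrow
      obtain ⟨_, _, h⟩ := hrow
      simp [← h]
  have hrect1 : pvRect N.toNat grid1 :=
    pvRect_foldl N rfl (fun t => (t.1, t.2.1)) (fun t => PySem.Int.toStr t.2.2) givens grid0 hrect0
  have hcell0 : (grid0.getD i []).getD j "" = "." := by
    simp only [grid0]
    rw [List.getD_eq_getElem?_getD]
    simp [hi, hj]
  have hcell1 : (grid1.getD i []).getD j "" =
      (match (givens.foldl (fun d t => d.insert (t.1, t.2.1) t.2.2) PySem.Dict.empty).get?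
          ((i : Int) + 1, (j : Int) + 1) with
        | some d => PySem.Int.toStr d | none => ".") := by
    rw [pvCell_foldl (fun t => (t.1, t.2.1)) (fun t => PySem.Int.toStr t.2.2) givens grid0 hrect0 rfl hi hj]
    rw [hcell0, pvDict_get?_foldl, PySem.Dict.get?_empty]
    exact pvFold_match ((i : Int) + 1, (j : Int) + 1) givens none
  have hcell2 := pvCell_foldl (fun t => t) (fun _ => "■") blocked grid1 hrect1 rfl hi hj
  simp only at hcell2
  rw [show grid2 = blocked.foldl (fun g t => pvSetCell N g t.1 t.2 "■") grid1 from rfl, hcell2,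
    pvFoldl_blocked, hcell1, pvCellA]
  have hmem : PySem.Set.contains (PySem.Set.ofList blocked) ((i:Int)+1, (j:Int)+1) =
      decide (((i:Int)+1, (j:Int)+1) ∈ blocked) := by
    rw [Bool.eq_iff_iff, PySem.Set.contains_iff, PySem.Set.mem_ofList, decide_eq_true_iff]
  rw [hmem]
  by_cases hb : ((i:Int)+1, (j:Int)+1) ∈ blocked
  · simp [hb]
  · simp [hb]

-- A's nested fold as a nested map
theorem pvA_as_map (N : Int) (blocked : List (Int × Int)) (givens : List (Int × Int × Int)) :
    summarize_problem N blocked givens =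
      PySem.Str.join "\n"
        ((PySem.List.pyRange 1 (N + 1) 1).map (fun r =>
          PySem.Str.join " " ((PySem.List.pyRange 1 (N + 1) 1).map
            (fun c => pvCellA (PySem.Set.ofList blocked)
              (givens.foldl (fun d t => d.insert (t.1, t.2.1) t.2.2) PySem.Dict.empty) r c)))) := by
  unfold summarize_problem
  dsimp only
  congr 1
  have hinner : ∀ (r : Int) (acc : List String),
      (PySem.List.pyRange 1 (N + 1) 1).foldl (fun row c =>
        if PySem.Set.contains (PySem.Set.ofList blocked) (r, c) then row ++ ["■"]
        else match (givens.foldl (fun d t => d.insert (t.1, t.2.1) t.2.2) PySem.Dict.empty).get? (r, c) with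
          | some d => row ++ [PySem.Int.toStr d]
          | none => row ++ ["."]) acc =
      acc ++ (PySem.List.pyRange 1 (N + 1) 1).map (fun c =>
        pvCellA (PySem.Set.ofList blocked)
          (givens.foldl (fun d t => d.insert (t.1, t.2.1) t.2.2) PySem.Dict.empty) r c) := by
    intro r acc
    rw [show (fun row c =>
        if PySem.Set.contains (PySem.Set.ofList blocked) (r, c) then row ++ ["■"]
        else match (givens.foldl (fun d t => d.insert (t.1, t.2.1) t.2.2) PySem.Dict.empty).get? (r, c) with
          | some d => row ++ [PySem.Int.toStr d]
          | none => row ++ ["."]) =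
      (fun (row : List String) c => row ++ [pvCellA (PySem.Set.ofList blocked)
          (givens.foldl (fun d t => d.insert (t.1, t.2.1) t.2.2) PySem.Dict.empty) r c]) from ?_]
    · exact PySem.List.foldl_append_singleton_eq_map _ _ _
    · funext row c
      unfold pvCellA
      split
      · rfl
      · rename_i h
        cases hk : (givens.foldl (fun d t => d.insert (t.1, t.2.1) t.2.2) PySem.Dict.empty).get? (r, c) <;> simp
  calc (PySem.List.pyRange 1 (N + 1) 1).foldl _ ([] : List String)
      = (PySem.List.pyRange 1 (N + 1) 1).foldl (fun lines r =>
          lines ++ [PySem.Str.join " " ((PySem.List.pyRange 1 (N + 1) 1).map (fun c =>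
            pvCellA (PySem.Set.ofList blocked)
              (givens.foldl (fun d t => d.insert (t.1, t.2.1) t.2.2) PySem.Dict.empty) r c))]) [] := by
        apply PySem.List.foldl_congr_mem
        intro acc r _
        rw [hinner r []]
        simp
    _ = _ := by
        rw [PySem.List.foldl_append_singleton_eq_map]
        simp

-- ===== VERDICT (by name: the statement is the Claim_ definition above) =====
theorem summarize_problem_spec : Claim_equal_summarize_problem := by
  intro N blocked givens _
  unfold Spec_summarize_problem
  rw [pvA_as_map]
  unfold summarize_problem_alt
  dsimp only
  congr 1
  set grid0 : List (List String) := (List.range N.toNat).map (fun _ => List.replicate N.toNat ".") with hgrid0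
  set grid1 := givens.foldl (fun g t => pvSetCell N g t.1 t.2.1 (PySem.Int.toStr t.2.2)) grid0 with hgrid1
  set grid2 := blocked.foldl (fun g t => pvSetCell N g t.1 t.2 "■") grid1 with hgrid2
  have hrect0 : pvRect N.toNat grid0 := by
    constructor
    · simp [hgrid0]
    · intro row hrow
      simp only [hgrid0, List.mem_map] at hrow
      obtain ⟨_, _, h⟩ := hrow
      simp [← h]
  have hrect1 : pvRect N.toNat grid1 :=
    pvRect_foldl N rfl (fun t => (t.1, t.2.1)) (fun t => PySem.Int.toStr t.2.2) givens grid0 hrect0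
  have hrect2 : pvRect N.toNat grid2 :=
    pvRect_foldl N rfl (fun t => t) (fun _ => "■") blocked grid1 hrect1
  have hlenR : (PySem.List.pyRange 1 (N + 1) 1).length = N.toNat := by
    rw [PySem.List.length_pyRange_one]; congr 1; omega
  apply List.ext_getElem
  · rw [List.length_map, List.length_map, hlenR, hrect2.1]
  · intro i h1 h2
    simp only [List.length_map] at h1 h2
    rw [hlenR] at h1
    have hrowlen : grid2[i].length = N.toNat := hrect2.2 _ (List.getElem_mem _)
    simp only [List.getElem_map]
    rw [PySem.List.getElem_pyRange_one]
    congr 1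
    apply List.ext_getElem
    · rw [List.length_map, hlenR, hrowlen]
    · intro j hj1 hj2
      simp only [List.length_map] at hj1
      rw [hlenR] at hj1
      simp only [List.getElem_map]
      rw [PySem.List.getElem_pyRange_one]
      have hc : (grid2.getD i []).getD j "" =
          pvCellA (PySem.Set.ofList blocked)
            (givens.foldl (fun d t => d.insert (t.1, t.2.1) t.2.2) PySem.Dict.empty)
            ((i : Int) + 1) ((j : Int) + 1) := pvGridCell N blocked givens h1 hj1
      have hg1 : grid2.getD i [] = grid2[i] := by
        rw [List.getD_eq_getElem?_getD, List.getElem?_eq_getElem (by rw [hrect2.1]; exact h1),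
          Option.getD_some]
      rw [show ((1 : Int) + (i : Int)) = ((i : Int) + 1) from by ring,
        show ((1 : Int) + (j : Int)) = ((j : Int) + 1) from by ring, ← hc, hg1,
        List.getD_eq_getElem?_getD, List.getElem?_eq_getElem (by rw [hrowlen]; exact hj1),
        Option.getD_some]
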